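-- pv_equiv track=rewrite | github.com/konradreyhe/sacred-composer | sacred_composer/constraints.py | enforce_range
-- ===== SOURCE A (Python) =====
-- VOICE_RANGES = {
--     "soprano": (60, 81),   # C4 - A5
--     "alto": (53, 74),      # F3 - D5
--     "tenor": (48, 69),     # C3 - A4
--     "bass": (40, 62),      # E2 - D4
--     "melody": (60, 79),    # C4 - G5 (keep melody above bass)
--     "default": (48, 84),   # C3 - C6
-- }
--
-- def enforce_range(pitches: list[int], voice_type: str = "melody") -> list[int]:
--     """Clamp pitches to the valid range for a voice type, using octave transposition."""
--     lo, hi = VOICE_RANGES.get(voice_type, VOICE_RANGES["default"])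
--     result = []
--     for p in pitches:
--         while p > hi:
--             p -= 12
--         while p < lo:
--             p += 12
--         p = max(lo, min(hi, p))
--         result.append(p)
--     return result
-- ===== SOURCE B (Python) =====
-- VOICE_RANGES = {
--     "soprano": (60, 81),   # C4 - A5
--     "alto": (53, 74),      # F3 - D5
--     "tenor": (48, 69),     # C3 - A4
--     "bass": (40, 62),      # E2 - D4
--     "melody": (60, 79),    # C4 - G5 (keep melody above bass)
--     "default": (48, 84),   # C3 - C6
-- }
--
-- def enforce_range(pitches, voice_type="melody"):
--     lo, hi = VOICE_RANGES.get(voice_type, VOICE_RANGES["default"])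
--     out = []
--     for p in pitches:
--         if p > hi:
--             p -= 12 * ((p - hi + 11) // 12)
--         elif p < lo:
--             p += 12 * ((lo - p + 11) // 12)
--         out.append(p)
--     return out
-- ===== Notes on version B (the rewrite author's own statement) =====
-- stated objective: faster
-- what changed: Replaces the per-pitch while-loops that add/subtract 12 one octave at a time with a single closed-form ceiling-division octave shift (and drops the max/min clamp, a no-op since every voice range spans at least an octave).
import Mathlib
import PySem

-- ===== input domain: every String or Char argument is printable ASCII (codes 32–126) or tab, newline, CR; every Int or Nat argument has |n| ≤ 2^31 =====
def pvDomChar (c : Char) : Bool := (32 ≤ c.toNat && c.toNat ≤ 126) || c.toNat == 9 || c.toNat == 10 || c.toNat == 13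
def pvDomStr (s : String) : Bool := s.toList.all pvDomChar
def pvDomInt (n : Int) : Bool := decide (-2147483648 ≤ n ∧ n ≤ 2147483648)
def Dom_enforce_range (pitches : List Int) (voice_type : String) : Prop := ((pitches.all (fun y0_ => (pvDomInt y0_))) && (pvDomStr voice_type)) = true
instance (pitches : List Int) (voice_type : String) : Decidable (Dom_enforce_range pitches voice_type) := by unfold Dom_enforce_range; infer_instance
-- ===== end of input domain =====

-- B replaces the one-octave-at-a-time while loops with a closed-form ceiling-division octave shift (faster): the return values agree on all inputs.

-- ===== PORT A =====
-- the module constant VOICE_RANGES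
def pvVoiceRanges : PySem.Dict String (Int × Int) :=
  PySem.Dict.ofList [("soprano", (60, 81)), ("alto", (53, 74)), ("tenor", (48, 69)),
                     ("bass", (40, 62)), ("melody", (60, 79)), ("default", (48, 84))]

-- 'while p > hi: p -= 12'
def pvWhileHi (hi p : Int) : Int :=
  if p > hi then pvWhileHi hi (p - 12) else p
termination_by (p - hi).toNat
decreasing_by omega

-- 'while p < lo: p += 12'
def pvWhileLo (lo p : Int) : Int :=
  if p < lo then pvWhileLo lo (p + 12) else p
termination_by (lo - p).toNat
decreasing_by omega

def enforce_range (pitches : List Int) (voice_type : String) : List Int :=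
  -- VOICE_RANGES.get(voice_type, VOICE_RANGES["default"]); "default" is present, so the inner getD default (0,0) is never used
  let lohi := pvVoiceRanges.getD voice_type (pvVoiceRanges.getD "default" (0, 0))
  let lo := lohi.1
  let hi := lohi.2
  pitches.foldl (fun result p =>
    let p1 := pvWhileHi hi p
    let p2 := pvWhileLo lo p1
    result ++ [max lo (min hi p2)]) []

-- ===== PORT B =====
def enforce_range_alt (pitches : List Int) (voice_type : String) : List Int :=
  let lohi := pvVoiceRanges.getD voice_type (pvVoiceRanges.getD "default" (0, 0))
  let lo := lohi.1
  let hi := lohi.2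
  pitches.foldl (fun out p =>
    let p' := if p > hi then p - 12 * PySem.Int.floordiv (p - hi + 11) 12
              else if p < lo then p + 12 * PySem.Int.floordiv (lo - p + 11) 12
              else p
    out ++ [p']) []

-- ===== PRECONDITION & SPEC =====
def Spec_enforce_range (pitches : List Int) (voice_type : String) (out : List Int) : Prop := out = enforce_range_alt pitches voice_type
instance (pitches : List Int) (voice_type : String) (out : List Int) : Decidable (Spec_enforce_range pitches voice_type out) := by unfold Spec_enforce_range; infer_instance

-- ===== CLAIM (what is proved, stated in full; the proofs are below) =====
def Claim_equal_enforce_range : Prop := ∀ (pitches : List Int) (voice_type : String), Dom_enforce_range pitches voice_type → Spec_enforce_range pitches voice_type (enforce_range pitches voice_type)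

-- ===== LEMMAS AND PROOFS =====

-- every range in VOICE_RANGES spans more than an octave
lemma pvRanges_wide (vt : String) :
    (pvVoiceRanges.getD vt (pvVoiceRanges.getD "default" (0, 0))).1 + 11 ≤
    (pvVoiceRanges.getD vt (pvVoiceRanges.getD "default" (0, 0))).2 := by
  have hmk : pvVoiceRanges = PySem.Dict.mk
      [("soprano", (60, 81)), ("alto", (53, 74)), ("tenor", (48, 69)),
       ("bass", (40, 62)), ("melody", (60, 79)), ("default", (48, 84))] := by rfl
  rw [hmk]
  simp only [PySem.Dict.getD_eq_get?_getD, PySem.Dict.get?_mk_cons]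
  split_ifs <;> simp_all [PySem.Dict.get?]

lemma pvWhileHi_char (hi p : Int) :
    (p ≤ hi ∧ pvWhileHi hi p = p) ∨
    (hi < p ∧ hi - 12 < pvWhileHi hi p ∧ pvWhileHi hi p ≤ hi ∧ 12 ∣ (p - pvWhileHi hi p)) := by
  fun_induction pvWhileHi hi p with
  | case1 p h ih =>
    right
    rcases ih with ⟨h1, h2⟩ | ⟨h1, h2, h3, h4⟩ <;>
      refine ⟨h, ?_, ?_, ?_⟩ <;> omega
  | case2 p h => left; omega

lemma pvWhileLo_char (lo p : Int) :
    (lo ≤ p ∧ pvWhileLo lo p = p) ∨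
    (p < lo ∧ lo ≤ pvWhileLo lo p ∧ pvWhileLo lo p < lo + 12 ∧ 12 ∣ (pvWhileLo lo p - p)) := by
  fun_induction pvWhileLo lo p with
  | case1 p h ih =>
    right
    rcases ih with ⟨h1, h2⟩ | ⟨h1, h2, h3, h4⟩ <;>
      refine ⟨h, ?_, ?_, ?_⟩ <;> omega
  | case2 p h => left; omega

-- the pointwise agreement of the two per-pitch computations, for any range at least an octave wide
lemma pv_step_eq (lo hi p : Int) (hw : lo + 11 ≤ hi) :
    max lo (min hi (pvWhileLo lo (pvWhileHi hi p))) =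
    (if p > hi then p - 12 * PySem.Int.floordiv (p - hi + 11) 12
     else if p < lo then p + 12 * PySem.Int.floordiv (lo - p + 11) 12
     else p) := by
  by_cases hhi : p > hi
  · rw [if_pos hhi]
    rcases pvWhileHi_char hi p with ⟨h1, _⟩ | ⟨_, h2, h3, h4⟩
    · omega
    · set p1 := pvWhileHi hi p with hp1
      have hlo1 : lo ≤ p1 := by omega
      have hlo : pvWhileLo lo p1 = p1 := by
        rcases pvWhileLo_char lo p1 with ⟨_, h⟩ | ⟨h, _⟩ <;> omega
      rw [hlo]
      have h12 : (0 : Int) < 12 := by norm_num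
      rw [PySem.Int.floordiv_eq_ediv_of_pos h12]
      have hd := Int.mul_ediv_add_emod (p - hi + 11) 12
      have hm1 := Int.emod_nonneg (p - hi + 11) (by norm_num : (12:Int) ≠ 0)
      have hm2 := Int.emod_lt_of_pos (p - hi + 11) h12
      -- both values lie in (hi-12, hi] and differ from p by a multiple of 12
      have hdvd : (12 : Int) ∣ (p - (p - 12 * ((p - hi + 11) / 12))) := ⟨(p - hi + 11) / 12, by ring⟩
      omega
  · rw [if_neg hhi]
    have hhi' : pvWhileHi hi p = p := by
      rcases pvWhileHi_char hi p with ⟨_, h⟩ | ⟨h, _⟩ <;> omega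
    rw [hhi']
    by_cases hlo : p < lo
    · rw [if_pos hlo]
      rcases pvWhileLo_char lo p with ⟨h1, _⟩ | ⟨_, h2, h3, h4⟩
      · omega
      · have h12 : (0 : Int) < 12 := by norm_num
        rw [PySem.Int.floordiv_eq_ediv_of_pos h12]
        have hd := Int.mul_ediv_add_emod (lo - p + 11) 12
        have hm1 := Int.emod_nonneg (lo - p + 11) (by norm_num : (12:Int) ≠ 0)
        have hm2 := Int.emod_lt_of_pos (lo - p + 11) h12
        have hdvd : (12 : Int) ∣ ((p + 12 * ((lo - p + 11) / 12)) - p) := ⟨(lo - p + 11) / 12, by ring⟩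
        omega
    · rw [if_neg hlo]
      have h : pvWhileLo lo p = p := by
        rcases pvWhileLo_char lo p with ⟨_, h⟩ | ⟨h, _⟩ <;> omega
      rw [h]; omega

-- an append-accumulating fold is the map
lemma pv_foldl_append {α β : Type} (f : α → β) (xs : List α) (acc : List β) :
    xs.foldl (fun r p => r ++ [f p]) acc = acc ++ xs.map f := by
  induction xs generalizing acc with
  | nil => simp
  | cons x xs ih => simp [List.foldl, ih]

-- ===== VERDICT (by name: the statement is the Claim_ definition above) =====
theorem enforce_range_spec : Claim_equal_enforce_range := by
  intro pitches voice_type _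
  unfold Spec_enforce_range enforce_range enforce_range_alt
  simp only []
  rw [pv_foldl_append (fun p => max _ (min _ (pvWhileLo _ (pvWhileHi _ p)))) pitches [],
      pv_foldl_append _ pitches []]
  congr 1
  apply List.map_congr_left
  intro p _
  exact pv_step_eq _ _ p (pvRanges_wide voice_type)
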